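-- pv_equiv track=rewrite | github.com/omatheuspimenta/fiocruz-genomics-portal | app/utils/clinvar.py | clinvar_transform
-- ===== SOURCE A (Python) =====
-- from typing import Optional
--
-- SET_PATHOGENIC = {
--     "Pathogenic", "Likely pathogenic",
--     "Pathogenic/Likely pathogenic", "Likely pathogenic/Pathogenic"
-- }
--
-- SET_BENIGN = {
--     "Benign", "Likely benign",
--     "Benign/Likely benign", "Likely benign/Benign"
-- }
--
-- SET_VUS = {"Uncertain significance"}
--
-- SET_CONFLICTING = {"Conflicting classifications of pathogenicity"}
--
-- SET_DRUG = {"drug response"}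
--
-- SET_AFFECTS = {"Affects"}
--
-- SET_PROTECTIVE = {"protective"}
--
-- SET_LOW_PENETRANCE = {
--     "Pathogenic/Likely pathogenic/Pathogenic, low penetrance",
--     "Pathogenic/Pathogenic, low penetrance",
--     "Likely risk allele",
--     "Uncertain risk allele",
--     "Uncertain significance/Uncertain risk allele"
-- }
--
-- SET_NOT_PROVIDED = {"not provided", "NA", "", "nan"}
--
-- SET_ASSOCIATION = {"association"}
--
-- SET_RISK_FACTOR = {"risk factor"}
--
-- def clinvar_transform(clinvar_value: Optional[str]) -> str:
--     """
--     Transformation of ClinVar string to consensus classification.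
--     Input: 'Pathogenic;Likely pathogenic'
--     Output: 'Likely pathogenic/Pathogenic'
--     Args:
--         clinvar_value (str): Semicolon-separated ClinVar significance terms.
--     Returns:
--         str: Consensus classification.
--     """
--     # Exit for empty/None values
--     if not clinvar_value:
--         return "Not provided"
--
--     # Splits the string, strips whitespace, and creates a set of unique terms.
--     terms = {term.strip() for term in clinvar_value.split(';') if term.strip()}
--
--     # If cleaning resulted in an empty set (e.g. input was "; "), return Not Provided
--     if not terms:
--         return "Not provided"
--
--     # Classification Logic using Set Operations
--
--     if terms.issubset(SET_PATHOGENIC):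
--         return "Likely pathogenic/Pathogenic"
--
--     if terms.issubset(SET_BENIGN):
--         return "Likely benign/Benign"
--
--     if terms.issubset(SET_VUS):
--         return "Uncertain significance"
--
--     if terms.issubset(SET_CONFLICTING):
--         return "Conflicting classifications of pathogenicity"
--
--     if terms.issubset(SET_DRUG):
--         return "Drug response"
--
--     if terms.issubset(SET_AFFECTS):
--         return "Affects a non-disease phenotype"
--
--     if terms.issubset(SET_PROTECTIVE):
--         return "Protective"
--
--     if terms.issubset(SET_LOW_PENETRANCE):
--         return "Low penetrance for Mendelian diseases"
--
--     if terms.issubset(SET_NOT_PROVIDED):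
--         return "Not provided"
--
--     if terms.issubset(SET_ASSOCIATION):
--         return "GWAS hits"
--
--     if terms.issubset(SET_RISK_FACTOR):
--         return "Risk factor"
--
--     return "Other"
-- ===== SOURCE B (Python) =====
-- from typing import Optional
--
-- TERM_TO_CLASS = {
--     "Pathogenic": "Likely pathogenic/Pathogenic",
--     "Likely pathogenic": "Likely pathogenic/Pathogenic",
--     "Pathogenic/Likely pathogenic": "Likely pathogenic/Pathogenic",
--     "Likely pathogenic/Pathogenic": "Likely pathogenic/Pathogenic",
--     "Benign": "Likely benign/Benign",
--     "Likely benign": "Likely benign/Benign",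
--     "Benign/Likely benign": "Likely benign/Benign",
--     "Likely benign/Benign": "Likely benign/Benign",
--     "Uncertain significance": "Uncertain significance",
--     "Conflicting classifications of pathogenicity": "Conflicting classifications of pathogenicity",
--     "drug response": "Drug response",
--     "Affects": "Affects a non-disease phenotype",
--     "protective": "Protective",
--     "Pathogenic/Likely pathogenic/Pathogenic, low penetrance": "Low penetrance for Mendelian diseases",
--     "Pathogenic/Pathogenic, low penetrance": "Low penetrance for Mendelian diseases",
--     "Likely risk allele": "Low penetrance for Mendelian diseases",
--     "Uncertain risk allele": "Low penetrance for Mendelian diseases",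
--     "Uncertain significance/Uncertain risk allele": "Low penetrance for Mendelian diseases",
--     "not provided": "Not provided",
--     "NA": "Not provided",
--     "nan": "Not provided",
--     "association": "GWAS hits",
--     "risk factor": "Risk factor",
-- }
--
-- def clinvar_transform(clinvar_value: Optional[str]) -> str:
--     if not clinvar_value:
--         return "Not provided"
--     terms = {term.strip() for term in clinvar_value.split(';') if term.strip()}
--     if not terms:
--         return "Not provided"
--     classes = {TERM_TO_CLASS.get(term, "Other") for term in terms}
--     if len(classes) == 1:
--         return next(iter(classes))
--     return "Other"
-- ===== Notes on version B (the rewrite author's own statement) =====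
-- stated objective: simpler
-- what changed: Replaces A's fall-through chain of 11 issubset tests (one per consensus class) by a single prebuilt term-to-class table: each term is looked up once, the distinct looked-up classes are collected into a set, and the unique class is returned if there is exactly one, otherwise the fallback class.
import Mathlib
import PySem

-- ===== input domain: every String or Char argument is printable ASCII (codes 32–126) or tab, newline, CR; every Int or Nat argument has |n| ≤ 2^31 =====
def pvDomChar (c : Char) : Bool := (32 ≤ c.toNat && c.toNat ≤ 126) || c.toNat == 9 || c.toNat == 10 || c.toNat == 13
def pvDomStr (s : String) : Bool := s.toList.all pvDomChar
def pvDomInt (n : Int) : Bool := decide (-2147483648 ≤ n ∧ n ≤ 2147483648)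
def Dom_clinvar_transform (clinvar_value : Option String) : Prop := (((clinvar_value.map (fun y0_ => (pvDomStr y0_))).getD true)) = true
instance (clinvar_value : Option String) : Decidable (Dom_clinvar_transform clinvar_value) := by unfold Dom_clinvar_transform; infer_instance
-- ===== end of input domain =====

-- B replaces A's chain of 11 issubset tests by one term→class table lookup and a
-- "single distinct class" check (objective: simpler).

-- ===== PORT A =====
def SET_PATHOGENIC : PySem.Set String := PySem.Set.ofList
  ["Pathogenic", "Likely pathogenic",
   "Pathogenic/Likely pathogenic", "Likely pathogenic/Pathogenic"]
def SET_BENIGN : PySem.Set String := PySem.Set.ofList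
  ["Benign", "Likely benign",
   "Benign/Likely benign", "Likely benign/Benign"]
def SET_VUS : PySem.Set String := PySem.Set.ofList ["Uncertain significance"]
def SET_CONFLICTING : PySem.Set String := PySem.Set.ofList ["Conflicting classifications of pathogenicity"]
def SET_DRUG : PySem.Set String := PySem.Set.ofList ["drug response"]
def SET_AFFECTS : PySem.Set String := PySem.Set.ofList ["Affects"]
def SET_PROTECTIVE : PySem.Set String := PySem.Set.ofList ["protective"]
def SET_LOW_PENETRANCE : PySem.Set String := PySem.Set.ofList
  ["Pathogenic/Likely pathogenic/Pathogenic, low penetrance",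
   "Pathogenic/Pathogenic, low penetrance",
   "Likely risk allele",
   "Uncertain risk allele",
   "Uncertain significance/Uncertain risk allele"]
def SET_NOT_PROVIDED : PySem.Set String := PySem.Set.ofList ["not provided", "NA", "", "nan"]
def SET_ASSOCIATION : PySem.Set String := PySem.Set.ofList ["association"]
def SET_RISK_FACTOR : PySem.Set String := PySem.Set.ofList ["risk factor"]

-- 'not clinvar_value' on Optional[str] is: None or "".  s.split(';') with the
-- non-empty separator ";" never raises, so split? is always `some` here (getD [] is unreachable).
def clinvar_transform (clinvar_value : Option String) : String :=
  match clinvar_value with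
  | none => "Not provided"
  | some s =>
    if s = "" then "Not provided"
    else
      let terms : PySem.Set String :=
        PySem.Set.ofList ((((PySem.Str.split? s ";").getD []).map PySem.Str.strip).filter
          (fun term => term ≠ ""))
      if terms = [] then "Not provided"
      else if PySem.Set.issubset terms SET_PATHOGENIC then "Likely pathogenic/Pathogenic"
      else if PySem.Set.issubset terms SET_BENIGN then "Likely benign/Benign"
      else if PySem.Set.issubset terms SET_VUS then "Uncertain significance"
      else if PySem.Set.issubset terms SET_CONFLICTING then "Conflicting classifications of pathogenicity"
      else if PySem.Set.issubset terms SET_DRUG then "Drug response"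
      else if PySem.Set.issubset terms SET_AFFECTS then "Affects a non-disease phenotype"
      else if PySem.Set.issubset terms SET_PROTECTIVE then "Protective"
      else if PySem.Set.issubset terms SET_LOW_PENETRANCE then "Low penetrance for Mendelian diseases"
      else if PySem.Set.issubset terms SET_NOT_PROVIDED then "Not provided"
      else if PySem.Set.issubset terms SET_ASSOCIATION then "GWAS hits"
      else if PySem.Set.issubset terms SET_RISK_FACTOR then "Risk factor"
      else "Other"

-- ===== PORT B =====
def TERM_TO_CLASS : PySem.Dict String String := PySem.Dict.ofList
  [("Pathogenic", "Likely pathogenic/Pathogenic"),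
   ("Likely pathogenic", "Likely pathogenic/Pathogenic"),
   ("Pathogenic/Likely pathogenic", "Likely pathogenic/Pathogenic"),
   ("Likely pathogenic/Pathogenic", "Likely pathogenic/Pathogenic"),
   ("Benign", "Likely benign/Benign"),
   ("Likely benign", "Likely benign/Benign"),
   ("Benign/Likely benign", "Likely benign/Benign"),
   ("Likely benign/Benign", "Likely benign/Benign"),
   ("Uncertain significance", "Uncertain significance"),
   ("Conflicting classifications of pathogenicity", "Conflicting classifications of pathogenicity"),
   ("drug response", "Drug response"),
   ("Affects", "Affects a non-disease phenotype"),
   ("protective", "Protective"),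
   ("Pathogenic/Likely pathogenic/Pathogenic, low penetrance", "Low penetrance for Mendelian diseases"),
   ("Pathogenic/Pathogenic, low penetrance", "Low penetrance for Mendelian diseases"),
   ("Likely risk allele", "Low penetrance for Mendelian diseases"),
   ("Uncertain risk allele", "Low penetrance for Mendelian diseases"),
   ("Uncertain significance/Uncertain risk allele", "Low penetrance for Mendelian diseases"),
   ("not provided", "Not provided"),
   ("NA", "Not provided"),
   ("nan", "Not provided"),
   ("association", "GWAS hits"),
   ("risk factor", "Risk factor")]

-- 'next(iter(classes))' is taken only when classes is a singleton, whose unique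
-- element is its head (headD); the result is independent of the set's hash order.
def clinvar_transform_alt (clinvar_value : Option String) : String :=
  match clinvar_value with
  | none => "Not provided"
  | some s =>
    if s = "" then "Not provided"
    else
      let terms : PySem.Set String :=
        PySem.Set.ofList ((((PySem.Str.split? s ";").getD []).map PySem.Str.strip).filter
          (fun term => term ≠ ""))
      if terms = [] then "Not provided"
      else
        let classes : PySem.Set String :=
          PySem.Set.ofList (terms.map (fun term => PySem.Dict.getD TERM_TO_CLASS term "Other"))
        if classes.length = 1 then classes.headD "Other" else "Other"

-- ===== PRECONDITION & SPEC =====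
def Spec_clinvar_transform (clinvar_value : Option String) (out : String) : Prop := out = clinvar_transform_alt clinvar_value
instance (clinvar_value : Option String) (out : String) : Decidable (Spec_clinvar_transform clinvar_value out) := by unfold Spec_clinvar_transform; infer_instance

-- ===== CLAIM (what is proved, stated in full; the proofs are below) =====
def Claim_equal_clinvar_transform : Prop := ∀ (clinvar_value : Option String), Dom_clinvar_transform clinvar_value → Spec_clinvar_transform clinvar_value (clinvar_transform clinvar_value)

-- ===== LEMMAS AND PROOFS =====

-- B's per-term classifier (the table lookup), named for the proofs.
def pvClassOf (t : String) : String := PySem.Dict.getD TERM_TO_CLASS t "Other"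

-- For each non-empty term, membership in each of A's eleven sets is equivalent to
-- B's table lookup producing that set's class string; and the lookup's range.
def pvTbl (t : String) : Prop :=
  (t ∈ SET_PATHOGENIC ↔ pvClassOf t = "Likely pathogenic/Pathogenic") ∧
  (t ∈ SET_BENIGN ↔ pvClassOf t = "Likely benign/Benign") ∧
  (t ∈ SET_VUS ↔ pvClassOf t = "Uncertain significance") ∧
  (t ∈ SET_CONFLICTING ↔ pvClassOf t = "Conflicting classifications of pathogenicity") ∧
  (t ∈ SET_DRUG ↔ pvClassOf t = "Drug response") ∧
  (t ∈ SET_AFFECTS ↔ pvClassOf t = "Affects a non-disease phenotype") ∧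
  (t ∈ SET_PROTECTIVE ↔ pvClassOf t = "Protective") ∧
  (t ∈ SET_LOW_PENETRANCE ↔ pvClassOf t = "Low penetrance for Mendelian diseases") ∧
  (t ∈ SET_NOT_PROVIDED ↔ pvClassOf t = "Not provided") ∧
  (t ∈ SET_ASSOCIATION ↔ pvClassOf t = "GWAS hits") ∧
  (t ∈ SET_RISK_FACTOR ↔ pvClassOf t = "Risk factor") ∧
  pvClassOf t ∈ ["Likely pathogenic/Pathogenic", "Likely benign/Benign", "Uncertain significance",
    "Conflicting classifications of pathogenicity", "Drug response", "Affects a non-disease phenotype",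
    "Protective", "Low penetrance for Mendelian diseases", "Not provided", "GWAS hits", "Risk factor",
    "Other"]

theorem pv_getD_not_mem (items : List (String × String)) (t d : String)
    (h : ∀ p ∈ items, p.1 ≠ t) : PySem.Dict.getD ⟨items⟩ t d = d := by
  have hf : List.find? (fun p => p.1 == t) items = none := by
    rw [List.find?_eq_none]; intro p hp; simpa using h p hp
  simp [PySem.Dict.getD, PySem.Dict.get?, hf]

theorem pv_tbl (t : String) (ht : t ≠ "") : pvTbl t := by
  by_cases h1 : t = "Pathogenic"
  · subst h1; unfold pvTbl; decide
  by_cases h2 : t = "Likely pathogenic"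
  · subst h2; unfold pvTbl; decide
  by_cases h3 : t = "Pathogenic/Likely pathogenic"
  · subst h3; unfold pvTbl; decide
  by_cases h4 : t = "Likely pathogenic/Pathogenic"
  · subst h4; unfold pvTbl; decide
  by_cases h5 : t = "Benign"
  · subst h5; unfold pvTbl; decide
  by_cases h6 : t = "Likely benign"
  · subst h6; unfold pvTbl; decide
  by_cases h7 : t = "Benign/Likely benign"
  · subst h7; unfold pvTbl; decide
  by_cases h8 : t = "Likely benign/Benign"
  · subst h8; unfold pvTbl; decide
  by_cases h9 : t = "Uncertain significance"
  · subst h9; unfold pvTbl; decide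
  by_cases h10 : t = "Conflicting classifications of pathogenicity"
  · subst h10; unfold pvTbl; decide
  by_cases h11 : t = "drug response"
  · subst h11; unfold pvTbl; decide
  by_cases h12 : t = "Affects"
  · subst h12; unfold pvTbl; decide
  by_cases h13 : t = "protective"
  · subst h13; unfold pvTbl; decide
  by_cases h14 : t = "Pathogenic/Likely pathogenic/Pathogenic, low penetrance"
  · subst h14; unfold pvTbl; decide
  by_cases h15 : t = "Pathogenic/Pathogenic, low penetrance"
  · subst h15; unfold pvTbl; decide
  by_cases h16 : t = "Likely risk allele"
  · subst h16; unfold pvTbl; decide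
  by_cases h17 : t = "Uncertain risk allele"
  · subst h17; unfold pvTbl; decide
  by_cases h18 : t = "Uncertain significance/Uncertain risk allele"
  · subst h18; unfold pvTbl; decide
  by_cases h19 : t = "not provided"
  · subst h19; unfold pvTbl; decide
  by_cases h20 : t = "NA"
  · subst h20; unfold pvTbl; decide
  by_cases h21 : t = "nan"
  · subst h21; unfold pvTbl; decide
  by_cases h22 : t = "association"
  · subst h22; unfold pvTbl; decide
  by_cases h23 : t = "risk factor"
  · subst h23; unfold pvTbl; decide
  have hO : pvClassOf t = "Other" := by
    apply pv_getD_not_mem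
    intro p hp
    fin_cases hp <;> simp_all [ne_comm]
  unfold pvTbl
  simp [SET_PATHOGENIC, SET_BENIGN, SET_VUS, SET_CONFLICTING, SET_DRUG, SET_AFFECTS,
    SET_PROTECTIVE, SET_LOW_PENETRANCE, SET_NOT_PROVIDED, SET_ASSOCIATION, SET_RISK_FACTOR,
    PySem.Set.mem_ofList, hO, ht, h1, h2, h3, h4, h5, h6, h7, h8, h9, h10, h11, h12, h13, h14, h15, h16, h17, h18, h19, h20, h21, h22, h23]

theorem pv_foldl_add_of_mem (xs : List String) (s : PySem.Set String) (h : ∀ x ∈ xs, x ∈ s) :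
    xs.foldl PySem.Set.add s = s := by
  induction xs generalizing s with
  | nil => rfl
  | cons x xs ih =>
    have hx : PySem.Set.add s x = s := by
      simp [PySem.Set.add, PySem.Set.contains, h x (by simp)]
    simp only [List.foldl_cons, hx]
    exact ih s (fun y hy => h y (by simp [hy]))

theorem pv_ofList_const (l : List String) (c : String) (hne : l ≠ []) (h : ∀ x ∈ l, x = c) :
    PySem.Set.ofList l = [c] := by
  cases l with
  | nil => exact absurd rfl hne
  | cons x xs =>
    obtain rfl : x = c := h x (by simp)
    show (x :: xs).foldl PySem.Set.add [] = [x]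
    simp only [List.foldl_cons]
    exact pv_foldl_add_of_mem xs (PySem.Set.add [] x)
      (fun y hy => by simp [PySem.Set.add, h y (by simp [hy])])

theorem pv_issub (hd : String) (tl : List String) (S : PySem.Set String) (o : String)
    (hmem : ∀ t ∈ hd :: tl, (t ∈ S ↔ pvClassOf t = o)) :
    PySem.Set.issubset (hd :: tl) S = true ↔ ∀ t ∈ hd :: tl, pvClassOf t = o := by
  rw [PySem.Set.issubset_iff]
  exact ⟨fun hs t ht => (hmem t ht).mp (hs t ht), fun hs t ht => (hmem t ht).mpr (hs t ht)⟩

theorem pv_bool_eq_decide (b : Bool) (P : Prop) [Decidable P] (h : b = true ↔ P) :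
    b = decide P := by
  by_cases hp : P <;> simp [hp] <;> simp [hp] at h <;> exact h

-- The core: on any non-empty list of non-empty terms, A's issubset chain equals
-- B's "single distinct class" collapse.
theorem pv_main (terms : List String) (hne : terms ≠ []) (hnz : ∀ t ∈ terms, t ≠ "") :
    (if PySem.Set.issubset terms SET_PATHOGENIC then "Likely pathogenic/Pathogenic"
     else if PySem.Set.issubset terms SET_BENIGN then "Likely benign/Benign"
     else if PySem.Set.issubset terms SET_VUS then "Uncertain significance"
     else if PySem.Set.issubset terms SET_CONFLICTING then "Conflicting classifications of pathogenicity"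
     else if PySem.Set.issubset terms SET_DRUG then "Drug response"
     else if PySem.Set.issubset terms SET_AFFECTS then "Affects a non-disease phenotype"
     else if PySem.Set.issubset terms SET_PROTECTIVE then "Protective"
     else if PySem.Set.issubset terms SET_LOW_PENETRANCE then "Low penetrance for Mendelian diseases"
     else if PySem.Set.issubset terms SET_NOT_PROVIDED then "Not provided"
     else if PySem.Set.issubset terms SET_ASSOCIATION then "GWAS hits"
     else if PySem.Set.issubset terms SET_RISK_FACTOR then "Risk factor"
     else "Other")
    = (let classes := PySem.Set.ofList (terms.map pvClassOf)
       if classes.length = 1 then classes.headD "Other" else "Other") := by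
  obtain ⟨hd, tl, rfl⟩ : ∃ h t, terms = h :: t := by
    cases terms with
    | nil => exact absurd rfl hne
    | cons h t => exact ⟨h, t, rfl⟩
  have htbl : ∀ t ∈ hd :: tl, pvTbl t := fun t ht => pv_tbl t (hnz t ht)
  have E1 := pv_issub (hd := hd) (tl := tl) SET_PATHOGENIC "Likely pathogenic/Pathogenic" (fun t ht => (htbl t ht).1)
  have E2 := pv_issub (hd := hd) (tl := tl) SET_BENIGN "Likely benign/Benign" (fun t ht => (htbl t ht).2.1)
  have E3 := pv_issub (hd := hd) (tl := tl) SET_VUS "Uncertain significance" (fun t ht => (htbl t ht).2.2.1)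
  have E4 := pv_issub (hd := hd) (tl := tl) SET_CONFLICTING "Conflicting classifications of pathogenicity" (fun t ht => (htbl t ht).2.2.2.1)
  have E5 := pv_issub (hd := hd) (tl := tl) SET_DRUG "Drug response" (fun t ht => (htbl t ht).2.2.2.2.1)
  have E6 := pv_issub (hd := hd) (tl := tl) SET_AFFECTS "Affects a non-disease phenotype" (fun t ht => (htbl t ht).2.2.2.2.2.1)
  have E7 := pv_issub (hd := hd) (tl := tl) SET_PROTECTIVE "Protective" (fun t ht => (htbl t ht).2.2.2.2.2.2.1)
  have E8 := pv_issub (hd := hd) (tl := tl) SET_LOW_PENETRANCE "Low penetrance for Mendelian diseases" (fun t ht => (htbl t ht).2.2.2.2.2.2.2.1)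
  have E9 := pv_issub (hd := hd) (tl := tl) SET_NOT_PROVIDED "Not provided" (fun t ht => (htbl t ht).2.2.2.2.2.2.2.2.1)
  have E10 := pv_issub (hd := hd) (tl := tl) SET_ASSOCIATION "GWAS hits" (fun t ht => (htbl t ht).2.2.2.2.2.2.2.2.2.1)
  have E11 := pv_issub (hd := hd) (tl := tl) SET_RISK_FACTOR "Risk factor" (fun t ht => (htbl t ht).2.2.2.2.2.2.2.2.2.2.1)
  by_cases hall : ∀ t ∈ hd :: tl, pvClassOf t = pvClassOf hd
  · -- every term maps to the same class: B collapses to that class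
    have hclasses : PySem.Set.ofList ((hd :: tl).map pvClassOf) = [pvClassOf hd] := by
      apply pv_ofList_const _ _ (by simp)
      intro x hx
      obtain ⟨t, ht, rfl⟩ := List.mem_map.mp hx
      exact hall t ht
    have B1 : PySem.Set.issubset (hd :: tl) SET_PATHOGENIC = decide (pvClassOf hd = "Likely pathogenic/Pathogenic") := pv_bool_eq_decide _ _ (E1.trans ⟨fun h => h hd (by simp), fun h t ht => (hall t ht).trans h⟩)
    have B2 : PySem.Set.issubset (hd :: tl) SET_BENIGN = decide (pvClassOf hd = "Likely benign/Benign") := pv_bool_eq_decide _ _ (E2.trans ⟨fun h => h hd (by simp), fun h t ht => (hall t ht).trans h⟩)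
    have B3 : PySem.Set.issubset (hd :: tl) SET_VUS = decide (pvClassOf hd = "Uncertain significance") := pv_bool_eq_decide _ _ (E3.trans ⟨fun h => h hd (by simp), fun h t ht => (hall t ht).trans h⟩)
    have B4 : PySem.Set.issubset (hd :: tl) SET_CONFLICTING = decide (pvClassOf hd = "Conflicting classifications of pathogenicity") := pv_bool_eq_decide _ _ (E4.trans ⟨fun h => h hd (by simp), fun h t ht => (hall t ht).trans h⟩)
    have B5 : PySem.Set.issubset (hd :: tl) SET_DRUG = decide (pvClassOf hd = "Drug response") := pv_bool_eq_decide _ _ (E5.trans ⟨fun h => h hd (by simp), fun h t ht => (hall t ht).trans h⟩)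
    have B6 : PySem.Set.issubset (hd :: tl) SET_AFFECTS = decide (pvClassOf hd = "Affects a non-disease phenotype") := pv_bool_eq_decide _ _ (E6.trans ⟨fun h => h hd (by simp), fun h t ht => (hall t ht).trans h⟩)
    have B7 : PySem.Set.issubset (hd :: tl) SET_PROTECTIVE = decide (pvClassOf hd = "Protective") := pv_bool_eq_decide _ _ (E7.trans ⟨fun h => h hd (by simp), fun h t ht => (hall t ht).trans h⟩)
    have B8 : PySem.Set.issubset (hd :: tl) SET_LOW_PENETRANCE = decide (pvClassOf hd = "Low penetrance for Mendelian diseases") := pv_bool_eq_decide _ _ (E8.trans ⟨fun h => h hd (by simp), fun h t ht => (hall t ht).trans h⟩)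
    have B9 : PySem.Set.issubset (hd :: tl) SET_NOT_PROVIDED = decide (pvClassOf hd = "Not provided") := pv_bool_eq_decide _ _ (E9.trans ⟨fun h => h hd (by simp), fun h t ht => (hall t ht).trans h⟩)
    have B10 : PySem.Set.issubset (hd :: tl) SET_ASSOCIATION = decide (pvClassOf hd = "GWAS hits") := pv_bool_eq_decide _ _ (E10.trans ⟨fun h => h hd (by simp), fun h t ht => (hall t ht).trans h⟩)
    have B11 : PySem.Set.issubset (hd :: tl) SET_RISK_FACTOR = decide (pvClassOf hd = "Risk factor") := pv_bool_eq_decide _ _ (E11.trans ⟨fun h => h hd (by simp), fun h t ht => (hall t ht).trans h⟩)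
    rw [B1, B2, B3, B4, B5, B6, B7, B8, B9, B10, B11]
    simp only [hclasses]
    have hrange := (htbl hd (by simp)).2.2.2.2.2.2.2.2.2.2.2
    simp only [List.mem_cons, List.not_mem_nil, or_false] at hrange
    rcases hrange with h | h | h | h | h | h | h | h | h | h | h | h <;> rw [h] <;> simp
  · -- two terms map to different classes: every issubset is false, B sees ≥ 2 classes
    push Not at hall
    obtain ⟨t0, ht0, hneq⟩ := hall
    have N1 : PySem.Set.issubset (hd :: tl) SET_PATHOGENIC = false := by
      rw [← Bool.not_eq_true]; intro h
      exact hneq (((E1.mp h) t0 ht0).trans ((E1.mp h) hd (by simp)).symm)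
    have N2 : PySem.Set.issubset (hd :: tl) SET_BENIGN = false := by
      rw [← Bool.not_eq_true]; intro h
      exact hneq (((E2.mp h) t0 ht0).trans ((E2.mp h) hd (by simp)).symm)
    have N3 : PySem.Set.issubset (hd :: tl) SET_VUS = false := by
      rw [← Bool.not_eq_true]; intro h
      exact hneq (((E3.mp h) t0 ht0).trans ((E3.mp h) hd (by simp)).symm)
    have N4 : PySem.Set.issubset (hd :: tl) SET_CONFLICTING = false := by
      rw [← Bool.not_eq_true]; intro h
      exact hneq (((E4.mp h) t0 ht0).trans ((E4.mp h) hd (by simp)).symm)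
    have N5 : PySem.Set.issubset (hd :: tl) SET_DRUG = false := by
      rw [← Bool.not_eq_true]; intro h
      exact hneq (((E5.mp h) t0 ht0).trans ((E5.mp h) hd (by simp)).symm)
    have N6 : PySem.Set.issubset (hd :: tl) SET_AFFECTS = false := by
      rw [← Bool.not_eq_true]; intro h
      exact hneq (((E6.mp h) t0 ht0).trans ((E6.mp h) hd (by simp)).symm)
    have N7 : PySem.Set.issubset (hd :: tl) SET_PROTECTIVE = false := by
      rw [← Bool.not_eq_true]; intro h
      exact hneq (((E7.mp h) t0 ht0).trans ((E7.mp h) hd (by simp)).symm)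
    have N8 : PySem.Set.issubset (hd :: tl) SET_LOW_PENETRANCE = false := by
      rw [← Bool.not_eq_true]; intro h
      exact hneq (((E8.mp h) t0 ht0).trans ((E8.mp h) hd (by simp)).symm)
    have N9 : PySem.Set.issubset (hd :: tl) SET_NOT_PROVIDED = false := by
      rw [← Bool.not_eq_true]; intro h
      exact hneq (((E9.mp h) t0 ht0).trans ((E9.mp h) hd (by simp)).symm)
    have N10 : PySem.Set.issubset (hd :: tl) SET_ASSOCIATION = false := by
      rw [← Bool.not_eq_true]; intro h
      exact hneq (((E10.mp h) t0 ht0).trans ((E10.mp h) hd (by simp)).symm)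
    have N11 : PySem.Set.issubset (hd :: tl) SET_RISK_FACTOR = false := by
      rw [← Bool.not_eq_true]; intro h
      exact hneq (((E11.mp h) t0 ht0).trans ((E11.mp h) hd (by simp)).symm)
    rw [N1, N2, N3, N4, N5, N6, N7, N8, N9, N10, N11]
    have hm1 : pvClassOf hd ∈ PySem.Set.ofList ((hd :: tl).map pvClassOf) :=
      (PySem.Set.mem_ofList _ _).mpr (List.mem_map.mpr ⟨hd, by simp, rfl⟩)
    have hm0 : pvClassOf t0 ∈ PySem.Set.ofList ((hd :: tl).map pvClassOf) :=
      (PySem.Set.mem_ofList _ _).mpr (List.mem_map.mpr ⟨t0, ht0, rfl⟩)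
    have hlen : ¬ (PySem.Set.ofList ((hd :: tl).map pvClassOf)).length = 1 := by
      intro hlen
      obtain ⟨a, ha⟩ := List.length_eq_one_iff.mp hlen
      rw [ha] at hm1 hm0
      simp at hm1 hm0
      exact hneq (hm0.trans hm1.symm)
    simp only [hlen]
    simp


-- The shared wrapper: both ports' "terms empty" guard plus the core lemma.
theorem pv_some (terms : PySem.Set String) (hnz : ∀ t ∈ terms, t ≠ "") :
    (if terms = [] then "Not provided"
     else if PySem.Set.issubset terms SET_PATHOGENIC then "Likely pathogenic/Pathogenic"
     else if PySem.Set.issubset terms SET_BENIGN then "Likely benign/Benign"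
     else if PySem.Set.issubset terms SET_VUS then "Uncertain significance"
     else if PySem.Set.issubset terms SET_CONFLICTING then "Conflicting classifications of pathogenicity"
     else if PySem.Set.issubset terms SET_DRUG then "Drug response"
     else if PySem.Set.issubset terms SET_AFFECTS then "Affects a non-disease phenotype"
     else if PySem.Set.issubset terms SET_PROTECTIVE then "Protective"
     else if PySem.Set.issubset terms SET_LOW_PENETRANCE then "Low penetrance for Mendelian diseases"
     else if PySem.Set.issubset terms SET_NOT_PROVIDED then "Not provided"
     else if PySem.Set.issubset terms SET_ASSOCIATION then "GWAS hits"
     else if PySem.Set.issubset terms SET_RISK_FACTOR then "Risk factor"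
     else "Other")
    = (if terms = [] then "Not provided"
       else
         let classes : PySem.Set String :=
           PySem.Set.ofList (terms.map (fun term => PySem.Dict.getD TERM_TO_CLASS term "Other"))
         if classes.length = 1 then classes.headD "Other" else "Other") := by
  by_cases hT : terms = []
  · rw [if_pos hT, if_pos hT]
  · rw [if_neg hT, if_neg hT]
    exact pv_main terms hT hnz

-- ===== VERDICT (by name: the statement is the Claim_ definition above) =====
theorem clinvar_transform_spec : Claim_equal_clinvar_transform := by
  intro clinvar_value _
  unfold Spec_clinvar_transform clinvar_transform clinvar_transform_alt
  cases clinvar_value with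
  | none => rfl
  | some s =>
    by_cases hs : s = ""
    · simp [hs]
    · simp only [if_neg hs]
      exact pv_some _ (fun t ht => by
        have := (PySem.Set.mem_ofList _ _).mp ht
        simpa using (List.mem_filter.mp this).2)
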